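-- pv_equiv track=rewrite | github.com/JumpSushi/lionel-bulletin | app/services/bulletin_scraper.py | determine_specific_year_group_targeting
-- ===== SOURCE A (Python) =====
-- def determine_specific_year_group_targeting(content, year_groups_str=""):
--     """Determine if bulletin specifically targets certain year groups"""
--     text = (content + " " + (year_groups_str or "")).lower()
--
--     # Check for explicit year group mentions
--     year_indicators = {
--         '7': ['year 7', 'yr 7', 'y7', 'grade 7', 'seventh grade', 'year seven'],
--         '8': ['year 8', 'yr 8', 'y8', 'grade 8', 'eighth grade', 'year eight'],
--         '9': ['year 9', 'yr 9', 'y9', 'grade 9', 'ninth grade', 'year nine'],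
--         '10': ['year 10', 'yr 10', 'y10', 'grade 10', 'tenth grade', 'year ten'],
--         '11': ['year 11', 'yr 11', 'y11', 'grade 11', 'eleventh grade', 'year eleven'],
--         '12': ['year 12', 'yr 12', 'y12', 'grade 12', 'twelfth grade', 'year twelve'],
--         '13': ['year 13', 'yr 13', 'y13', 'grade 13', 'thirteenth grade', 'year thirteen']
--     }
--
--     # Find which year groups are specifically mentioned
--     mentioned_years = []
--     for year, indicators in year_indicators.items():
--         if any(indicator in text for indicator in indicators):
--             mentioned_years.append(year)
--
--     # Return True if specific year groups are mentioned, False if it's general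
--     return len(mentioned_years) > 0
-- ===== SOURCE B (Python) =====
-- ALL_INDICATORS = (
--     'year 7', 'yr 7', 'y7', 'grade 7', 'seventh grade', 'year seven',
--     'year 8', 'yr 8', 'y8', 'grade 8', 'eighth grade', 'year eight',
--     'year 9', 'yr 9', 'y9', 'grade 9', 'ninth grade', 'year nine',
--     'year 10', 'yr 10', 'y10', 'grade 10', 'tenth grade', 'year ten',
--     'year 11', 'yr 11', 'y11', 'grade 11', 'eleventh grade', 'year eleven',
--     'year 12', 'yr 12', 'y12', 'grade 12', 'twelfth grade', 'year twelve',
--     'year 13', 'yr 13', 'y13', 'grade 13', 'thirteenth grade', 'year thirteen',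
-- )
--
-- HEADS = "egnsty"  # the first letters of the indicators above
--
--
-- def determine_specific_year_group_targeting(content, year_groups_str=""):
--     """One left-to-right scan over the text: at each position whose character
--     can start an indicator, test (one C-level call) whether some indicator
--     starts there.  (A instead runs a separate substring search per indicator
--     and accumulates the mentioned year keys.)"""
--     text = (content + " " + (year_groups_str or "")).lower()
--     return any(
--         text.startswith(ALL_INDICATORS, i)
--         for i in range(len(text)) if text[i] in HEADS
--     )
-- ===== Notes on version B (the rewrite author's own statement) =====
-- stated objective: alternative
-- what changed: B flattens the indicator dict into one tuple and makes a single left-to-right positional scan over the text (skipping positions whose character can start no indicator, one tuple-startswith test at the rest), instead of A's per-year accumulation of a mentioned_years list driven by one full substring search per indicator.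
import Mathlib
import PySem

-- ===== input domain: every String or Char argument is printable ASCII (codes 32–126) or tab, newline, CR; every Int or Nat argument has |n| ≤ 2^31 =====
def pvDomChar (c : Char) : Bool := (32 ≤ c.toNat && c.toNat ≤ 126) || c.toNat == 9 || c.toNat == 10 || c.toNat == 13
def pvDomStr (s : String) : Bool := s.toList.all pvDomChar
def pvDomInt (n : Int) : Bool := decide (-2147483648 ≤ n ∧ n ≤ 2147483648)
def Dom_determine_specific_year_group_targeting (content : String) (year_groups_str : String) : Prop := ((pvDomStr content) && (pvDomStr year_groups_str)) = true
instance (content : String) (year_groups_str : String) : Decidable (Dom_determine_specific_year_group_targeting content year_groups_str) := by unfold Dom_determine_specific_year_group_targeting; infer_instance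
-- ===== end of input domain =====

-- B replaces A's per-year accumulation (one substring search per indicator) by a single
-- left-to-right positional scan over the text against the flattened indicator list (alternative).
set_option maxRecDepth 4000


-- ===== PORT A =====
-- the year_indicators dict, in insertion order
def pvYearIndicators : List (String × List String) :=
  [("7",  ["year 7", "yr 7", "y7", "grade 7", "seventh grade", "year seven"]),
   ("8",  ["year 8", "yr 8", "y8", "grade 8", "eighth grade", "year eight"]),
   ("9",  ["year 9", "yr 9", "y9", "grade 9", "ninth grade", "year nine"]),
   ("10", ["year 10", "yr 10", "y10", "grade 10", "tenth grade", "year ten"]),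
   ("11", ["year 11", "yr 11", "y11", "grade 11", "eleventh grade", "year eleven"]),
   ("12", ["year 12", "yr 12", "y12", "grade 12", "twelfth grade", "year twelve"]),
   ("13", ["year 13", "yr 13", "y13", "grade 13", "thirteenth grade", "year thirteen"])]

def determine_specific_year_group_targeting (content : String) (year_groups_str : String) : Bool :=
  -- text = (content + " " + (year_groups_str or "")).lower()    ('or ""' keeps a non-empty string)
  let text := PySem.Str.lower (content ++ " " ++ (if year_groups_str == "" then "" else year_groups_str))
  -- for year, indicators in year_indicators.items(): if any(...): mentioned_years.append(year)
  let mentioned_years := pvYearIndicators.foldl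
    (fun acc e => if e.2.any (fun indicator => PySem.Str.isIn indicator text) then acc ++ [e.1] else acc) []
  decide (mentioned_years.length > 0)

-- ===== PORT B =====
-- the flat ALL_INDICATORS tuple of Source B
def pvAllIndicators : List String :=
  ["year 7", "yr 7", "y7", "grade 7", "seventh grade", "year seven",
   "year 8", "yr 8", "y8", "grade 8", "eighth grade", "year eight",
   "year 9", "yr 9", "y9", "grade 9", "ninth grade", "year nine",
   "year 10", "yr 10", "y10", "grade 10", "tenth grade", "year ten",
   "year 11", "yr 11", "y11", "grade 11", "eleventh grade", "year eleven",
   "year 12", "yr 12", "y12", "grade 12", "twelfth grade", "year twelve",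
   "year 13", "yr 13", "y13", "grade 13", "thirteenth grade", "year thirteen"]

-- the filtered position loop 'any(text.startswith(ALL_INDICATORS, i) for i in range(len(text))
-- if text[i] in HEADS)' as the obvious structural recursion over the suffixes of the text; this is
-- exact: 'text[i] in HEADS' is PySem.Chars.isIn [text[i]] HEADS, and text.startswith(tuple, i) with
-- 0 <= i < len(text) is Python's 'some element of the tuple is a prefix of text[i:]', i.e.
-- pats.any (PySem.Chars.startswith (text.drop i)).
def pvScan (pats : List (List Char)) : List Char → Bool
  | [] => false
  | c :: rest =>
      (if PySem.Chars.isIn [c] "egnsty".toList then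
        pats.any (fun p => PySem.Chars.startswith (c :: rest) p)
      else false)
      || pvScan pats rest

def determine_specific_year_group_targeting_alt (content : String) (year_groups_str : String) : Bool :=
  let text := PySem.Str.lower (content ++ " " ++ (if year_groups_str == "" then "" else year_groups_str))
  pvScan (pvAllIndicators.map String.toList) text.toList

-- ===== PRECONDITION & SPEC =====
def Spec_determine_specific_year_group_targeting (content : String) (year_groups_str : String) (out : Bool) : Prop := out = determine_specific_year_group_targeting_alt content year_groups_str
instance (content : String) (year_groups_str : String) (out : Bool) : Decidable (Spec_determine_specific_year_group_targeting content year_groups_str out) := by unfold Spec_determine_specific_year_group_targeting; infer_instance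

-- ===== CLAIM (what is proved, stated in full; the proofs are below) =====
def Claim_equal_determine_specific_year_group_targeting : Prop := ∀ (content : String) (year_groups_str : String), Dom_determine_specific_year_group_targeting content year_groups_str → Spec_determine_specific_year_group_targeting content year_groups_str (determine_specific_year_group_targeting content year_groups_str)

-- ===== LEMMAS AND PROOFS =====

-- at a position whose character cannot start any pattern, no pattern matches
theorem pvNoHead (pats : List (List Char))
    (hhead : ∀ p ∈ pats, p.head? ∈ ("egnsty".toList).map some)
    (c : Char) (l : List Char) (hc : PySem.Chars.isIn [c] "egnsty".toList = false) :
    pats.any (fun p => PySem.Chars.startswith (c :: l) p) = false := by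
  have hcm : c ∉ "egnsty".toList := by
    intro hm
    rw [PySem.Chars.isIn_eq_false_iff] at hc
    obtain ⟨s, t, heq⟩ := List.mem_iff_append.mp hm
    exact hc ⟨s, t, by rw [heq]; simp⟩
  rw [List.any_eq_false]
  intro p hp
  obtain ⟨a, ha, hh⟩ := List.mem_map.mp (hhead p hp)
  cases p with
  | nil => simp at hh
  | cons b q =>
      rw [List.head?_cons, Option.some_inj] at hh
      subst hh
      rw [PySem.Chars.startswith_iff]
      intro hpre
      exact hcm ((List.cons_prefix_cons.mp hpre).1 ▸ ha)

-- the filtered positional scan finds exactly the patterns that are a prefix of some suffix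
theorem pvScan_iff (pats : List (List Char))
    (hne : ∀ p ∈ pats, p ≠ [])
    (hhead : ∀ p ∈ pats, p.head? ∈ ("egnsty".toList).map some)
    (t : List Char) :
    pvScan pats t = true ↔ ∃ p ∈ pats, ∃ j, p <+: t.drop j := by
  induction t with
  | nil =>
      simp only [pvScan, Bool.false_eq_true, false_iff]
      rintro ⟨p, hp, _, hpre⟩
      rw [List.drop_nil] at hpre
      exact hne p hp (List.prefix_nil.mp hpre)
  | cons c rest ih =>
      simp only [pvScan]
      by_cases hc : PySem.Chars.isIn [c] "egnsty".toList = true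
      · rw [if_pos hc, Bool.or_eq_true, List.any_eq_true, ih]
        constructor
        · rintro (⟨p, hp, h⟩ | ⟨p, hp, j, h⟩)
          · exact ⟨p, hp, 0, (PySem.Chars.startswith_iff _ _).mp h⟩
          · exact ⟨p, hp, j + 1, h⟩
        · rintro ⟨p, hp, j, h⟩
          rcases j with _ | j
          · exact Or.inl ⟨p, hp, (PySem.Chars.startswith_iff _ _).mpr h⟩
          · exact Or.inr ⟨p, hp, j, h⟩
      · have hnm := pvNoHead pats hhead c rest (Bool.not_eq_true _ ▸ eq_false_of_ne_true hc)
        rw [List.any_eq_false] at hnm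
        rw [if_neg hc, Bool.false_or, ih]
        constructor
        · rintro ⟨p, hp, j, h⟩
          exact ⟨p, hp, j + 1, h⟩
        · rintro ⟨p, hp, j, h⟩
          rcases j with _ | j
          · exact absurd ((PySem.Chars.startswith_iff _ _).mpr h) (hnm p hp)
          · exact ⟨p, hp, j, h⟩

-- A's accumulating fold produces a non-empty list iff the accumulator already was, or some entry fires
theorem pvFold_pos (entries : List (String × List String)) (cond : String × List String → Bool)
    (acc : List String) :
    0 < (entries.foldl (fun a e => if cond e then a ++ [e.1] else a) acc).length ↔
      0 < acc.length ∨ entries.any cond = true := by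
  induction entries generalizing acc with
  | nil => simp
  | cons e es ih =>
      simp only [List.foldl_cons, List.any_cons, Bool.or_eq_true]
      by_cases h : cond e = true
      · simp [h, ih]
      · simp [h, ih]

-- the flat indicator list is the flattening of the dict's value lists
theorem pvAll_eq : pvAllIndicators = pvYearIndicators.flatMap Prod.snd := by decide

theorem determine_eq (content year_groups_str : String) :
    determine_specific_year_group_targeting content year_groups_str =
      determine_specific_year_group_targeting_alt content year_groups_str := by
  unfold determine_specific_year_group_targeting determine_specific_year_group_targeting_alt
  set text := PySem.Str.lower (content ++ " " ++ (if year_groups_str == "" then "" else year_groups_str)) with htext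
  rw [Bool.eq_iff_iff]
  rw [pvScan_iff _ (by decide) (by decide), decide_eq_true_iff, gt_iff_lt, pvFold_pos]
  simp only [List.length_nil, lt_self_iff_false, false_or, List.any_eq_true, List.mem_map,
    pvAll_eq, List.mem_flatMap]
  constructor
  · rintro ⟨e, he, ind, hind, hin⟩
    refine ⟨ind.toList, ⟨ind, ⟨e, he, hind⟩, rfl⟩, ?_⟩
    rw [PySem.Chars.exists_prefix_drop_iff_isIn]
    exact (PySem.Str.isIn_iff_infix ind text).mp hin |> (PySem.Chars.isIn_iff_infix _ _).mpr
  · rintro ⟨p, ⟨ind, ⟨e, he, hind⟩, rfl⟩, hj⟩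
    refine ⟨e, he, ind, hind, ?_⟩
    rw [PySem.Chars.exists_prefix_drop_iff_isIn] at hj
    exact (PySem.Str.isIn_iff_infix ind text).mpr ((PySem.Chars.isIn_iff_infix _ _).mp hj)

-- ===== VERDICT (by name: the statement is the Claim_ definition above) =====
theorem determine_specific_year_group_targeting_spec : Claim_equal_determine_specific_year_group_targeting := by
  intro content year_groups_str _
  unfold Spec_determine_specific_year_group_targeting
  exact determine_eq content year_groups_str
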